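-- pv_equiv track=rewrite | github.com/rjrealworld/lets-play-chess | .history/chess2_20210120101947.py | fen_notation
-- ===== SOURCE A (Python) =====
-- def fen_notation(rank_file):
--     fen = ''
--     for rank in rank_file:
--         count = 0
--         for file in rank:
--             if file not in 'RNBKQPrnbkqp':
--                 count += 1
--             else:
--                 if count>0:
--                     fen += str(count)
--                     count = 0
--                 fen += file
--         if count>0:
--             fen += str(count)
--             count = 0
--         fen += ' / '
--     return fen[:-3]
-- ===== SOURCE B (Python) =====
-- def fen_notation(rank_file):
--     PIECES = 'RNBKQPrnbkqp'
--
--     def rank_fen(rank):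
--         # locate the pieces first; empty runs never get scanned or counted --
--         # their lengths are the gaps between consecutive piece indices
--         pieces = [(i, f) for i, f in enumerate(rank) if f in PIECES]
--         s = ''
--         prev = -1
--         for i, f in pieces:
--             gap = i - prev - 1
--             if gap > 0:
--                 s += str(gap)
--             s += f
--             prev = i
--         tail = len(rank) - prev - 1
--         if tail > 0:
--             s += str(tail)
--         return s
--
--     return ' / '.join(rank_fen(r) for r in rank_file)
-- ===== Notes on version B (the rewrite author's own statement) =====
-- stated objective: alternative
-- what changed: B never counts empty squares at all: per rank it first collects the piece positions via an enumerate-filter pass, then emits each piece preceded by the index gap (i - prev - 1) since the previous piece, plus a final tail gap, and joins the rank strings with ' / '; A instead makes one pass with a running empty-square counter flushed at each piece and strips a trailing separator.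
import Mathlib
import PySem

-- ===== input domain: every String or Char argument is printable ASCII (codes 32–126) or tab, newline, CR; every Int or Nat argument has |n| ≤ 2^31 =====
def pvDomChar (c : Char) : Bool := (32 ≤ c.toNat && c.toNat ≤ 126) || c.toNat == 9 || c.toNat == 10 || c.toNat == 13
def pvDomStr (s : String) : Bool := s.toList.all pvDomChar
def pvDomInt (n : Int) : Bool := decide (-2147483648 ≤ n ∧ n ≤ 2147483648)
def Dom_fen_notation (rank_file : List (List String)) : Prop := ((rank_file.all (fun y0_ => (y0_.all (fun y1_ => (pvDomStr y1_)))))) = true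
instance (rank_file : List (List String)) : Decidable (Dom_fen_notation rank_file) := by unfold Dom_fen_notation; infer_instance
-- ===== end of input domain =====

-- B replaces A's running empty-square counter (flushed at each piece, trailing separator stripped)
-- by per-rank piece positions whose index gaps give the empty-run lengths, joined with ' / '.
-- Strings are handled as char lists via PySem.Chars (exact on the ASCII domain).

-- ===== PORT A =====
-- one step of A's inner loop: state = (fen so far, count of pending empty squares)
def pvStepA (st : List Char × Int) (file : String) : List Char × Int :=
  if ¬ (PySem.Str.isIn file "RNBKQPrnbkqp" = true) then (st.1, st.2 + 1)
  else ((if st.2 > 0 then st.1 ++ PySem.Int.toChars st.2 else st.1) ++ file.toList, 0)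

-- A's outer-loop body: the inner loop, the final flush of count, then 'fen += " / "'
def pvRankA (fen : List Char) (rank : List String) : List Char :=
  let st := rank.foldl pvStepA (fen, 0)
  (if st.2 > 0 then st.1 ++ PySem.Int.toChars st.2 else st.1) ++ " / ".toList

def fen_notation (rank_file : List (List String)) : String :=
  String.ofList (PySem.List.slice (rank_file.foldl pvRankA []) none (some (-3)))   -- fen[:-3]

-- ===== PORT B =====
-- B's inner loop over the piece list: state = (rank string so far, index of the previous piece)
def pvStepB (st : List Char × Int) (p : Int × String) : List Char × Int :=
  let gap := p.1 - st.2 - 1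
  ((if gap > 0 then st.1 ++ PySem.Int.toChars gap else st.1) ++ p.2.toList, p.1)

def pvRankFenB (rank : List String) : List Char :=
  let pieces := (PySem.List.enumerate rank 0).filter (fun p => PySem.Str.isIn p.2 "RNBKQPrnbkqp")
  let st := pieces.foldl pvStepB ([], -1)
  let tail := (rank.length : Int) - st.2 - 1
  if tail > 0 then st.1 ++ PySem.Int.toChars tail else st.1

def fen_notation_alt (rank_file : List (List String)) : String :=
  String.ofList (PySem.Chars.join " / ".toList (rank_file.map pvRankFenB))

-- ===== PRECONDITION & SPEC =====
def Spec_fen_notation (rank_file : List (List String)) (out : String) : Prop := out = fen_notation_alt rank_file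
instance (rank_file : List (List String)) (out : String) : Decidable (Spec_fen_notation rank_file out) := by unfold Spec_fen_notation; infer_instance

-- ===== CLAIM (what is proved, stated in full; the proofs are below) =====
def Claim_equal_fen_notation : Prop := ∀ (rank_file : List (List String)), Dom_fen_notation rank_file → Spec_fen_notation rank_file (fen_notation rank_file)

-- ===== LEMMAS AND PROOFS =====

-- canonical per-rank output given c pending empty squares
def pvG : List String → Int → List Char
  | [], c => if c > 0 then PySem.Int.toChars c else []
  | f :: r, c =>
      if PySem.Str.isIn f "RNBKQPrnbkqp" = true then
        ((if c > 0 then PySem.Int.toChars c else []) ++ f.toList) ++ pvG r 0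
      else pvG r (c + 1)

-- flushing A's pending count
def pvFlush (st : List Char × Int) : List Char :=
  if st.2 > 0 then st.1 ++ PySem.Int.toChars st.2 else st.1

-- A's inner loop computes pvG
lemma pvInnerA (rank : List String) :
    ∀ (F : List Char) (c : Int),
    pvFlush (rank.foldl pvStepA (F, c)) = F ++ pvG rank c := by
  induction rank with
  | nil => intro F c; simp only [List.foldl_nil, pvFlush, pvG]; split <;> simp
  | cons f r ih =>
    intro F c
    simp only [List.foldl_cons]
    by_cases h : PySem.Str.isIn f "RNBKQPrnbkqp" = true
    · have hA : pvStepA (F, c) f =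
          ((if c > 0 then F ++ PySem.Int.toChars c else F) ++ f.toList, 0) := by
        unfold pvStepA; rw [if_neg (not_not_intro h)]
      rw [hA, ih]
      simp only [pvG, if_pos h]
      split <;> simp
    · have hA : pvStepA (F, c) f = (F, c + 1) := by
        unfold pvStepA; rw [if_pos h]
      rw [hA, ih]
      simp only [pvG, if_neg h]

lemma pvRankA_eq (F : List Char) (rank : List String) :
    pvRankA F rank = F ++ pvG rank 0 ++ " / ".toList := by
  have := pvInnerA rank F 0
  simp only [pvFlush] at this
  simp only [pvRankA, this, List.append_assoc]

-- B's gap fold over the pieces enumerated from k computes pvG rank (k - prev - 1)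
lemma pvInnerB (rank : List String) :
    ∀ (k : Nat) (prev : Int) (S : List Char), prev ≤ (k : Int) - 1 →
    (let pieces := (PySem.List.enumerate rank (k : Int)).filter
        (fun p => PySem.Str.isIn p.2 "RNBKQPrnbkqp")
     let st := pieces.foldl pvStepB (S, prev)
     let tail := ((k + rank.length : Nat) : Int) - st.2 - 1
     if tail > 0 then st.1 ++ PySem.Int.toChars tail else st.1)
      = S ++ pvG rank ((k : Int) - prev - 1) := by
  induction rank with
  | nil =>
    intro k prev S _
    simp only [PySem.List.enumerate_nil, List.filter_nil, List.foldl_nil, List.length_nil,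
      Nat.add_zero, pvG]
    split <;> simp
  | cons f r ih =>
    intro k prev S hprev
    simp only [PySem.List.enumerate_cons, List.length_cons]
    have hN : k + (r.length + 1) = (k + 1) + r.length := by omega
    rw [hN]
    have hk1 : ((k : Int) + 1) = ((k + 1 : Nat) : Int) := by push_cast; ring
    by_cases h : PySem.Str.isIn f "RNBKQPrnbkqp" = true
    · simp only [List.filter_cons, h, if_pos, List.foldl_cons]
      have hstep : pvStepB (S, prev) ((k : Int), f) =
          ((if (k : Int) - prev - 1 > 0 then S ++ PySem.Int.toChars ((k : Int) - prev - 1)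
            else S) ++ f.toList, (k : Int)) := by
        simp [pvStepB]
      rw [hstep, hk1]
      have := ih (k + 1) (k : Int)
        ((if (k : Int) - prev - 1 > 0 then S ++ PySem.Int.toChars ((k : Int) - prev - 1)
          else S) ++ f.toList) (by push_cast; omega)
      simp only at this ⊢
      rw [this]
      have hc : ((k + 1 : Nat) : Int) - (k : Int) - 1 = 0 := by push_cast; ring
      rw [hc]
      simp only [pvG, if_pos h, List.append_assoc]
      split <;> simp
    · simp only [List.filter_cons, h]
      simp only [Bool.false_eq_true, if_false]
      rw [hk1]
      have := ih (k + 1) prev S (by push_cast; omega)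
      simp only at this ⊢
      rw [this]
      have hc : ((k + 1 : Nat) : Int) - prev - 1 = ((k : Int) - prev - 1) + 1 := by push_cast; ring
      rw [hc]
      simp only [pvG, if_neg h]

lemma pvRankFenB_eq (rank : List String) : pvRankFenB rank = pvG rank 0 := by
  have := pvInnerB rank 0 (-1) [] (by omega)
  simp only [Nat.cast_zero, Nat.zero_add] at this
  norm_num at this
  simp only [pvRankFenB]
  simpa using this

-- A's outer loop appends 'pvG rank 0 ++ " / "' per rank
lemma pvOuter (ranks : List (List String)) :
    ∀ (F : List Char),
    ranks.foldl pvRankA F = F ++ ((ranks.map (fun r => pvG r 0 ++ " / ".toList)).flatten) := by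
  induction ranks with
  | nil => intro F; simp
  | cons rank rest ih =>
    intro F
    simp only [List.foldl_cons, List.map_cons, List.flatten_cons]
    rw [pvRankA_eq, ih]
    simp

-- chunks glued with a trailing separator are the join plus one trailing separator
lemma pvFlatten_trail (sep : List Char) (ss : List (List Char)) (hne : ss ≠ []) :
    (ss.map (fun s => s ++ sep)).flatten = PySem.Chars.join sep ss ++ sep := by
  induction ss with
  | nil => exact absurd rfl hne
  | cons a t ih =>
    match t with
    | [] => simp [PySem.Chars.join_singleton]
    | b :: t' =>
        rw [List.map_cons, List.flatten_cons, ih (by simp), PySem.Chars.join_cons_cons]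
        simp

-- …and stripping the final ' / ' (3 chars) gives the join
lemma pvStrip_trail (ss : List (List Char)) :
    PySem.List.slice ((ss.map (fun s => s ++ " / ".toList)).flatten) none (some (-3)) =
      PySem.Chars.join " / ".toList ss := by
  match ss with
  | [] => simp [PySem.List.slice, PySem.Chars.join_nil]
  | a :: t =>
      rw [pvFlatten_trail _ _ (by simp)]
      rw [PySem.List.slice_to_neg_ofNat _ 3 (by omega)]
      have hlen : (PySem.Chars.join " / ".toList (a :: t) ++ " / ".toList).length =
          (PySem.Chars.join " / ".toList (a :: t)).length + 3 := by
        simp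
      rw [hlen]
      simp

-- ===== VERDICT (by name: the statement is the Claim_ definition above) =====
theorem fen_notation_spec : Claim_equal_fen_notation := by
  intro rank_file _
  show fen_notation rank_file = fen_notation_alt rank_file
  unfold fen_notation fen_notation_alt
  rw [pvOuter rank_file []]
  rw [show (rank_file.map (fun r => pvG r 0 ++ " / ".toList)) =
      ((rank_file.map (fun r => pvG r 0)).map (fun s => s ++ " / ".toList)) from by
    rw [List.map_map]; rfl]
  rw [List.nil_append, pvStrip_trail]
  rw [show rank_file.map pvRankFenB = rank_file.map (fun r => pvG r 0) from
    List.map_congr_left (fun r _ => pvRankFenB_eq r)]
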